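-- pv_equiv track=rewrite | github.com/KangchengHou/admix-kit | admix/data/_lanc.py | lanc_subset_snp_range
-- ===== SOURCE A (Python) =====
-- from typing import List, Tuple, Union, Dict, Sequence
-- from bisect import bisect_left, bisect_right
--
-- def clean_lanc(
--     breaks: List[List[int]], values: List[List[str]], remove_repeated_val: bool = False
-- ):
--     """Clean up local ancestry file
--
--     Parameters
--     ----------
--     breaks : List[List[int]]
--         break points
--     values : List[List[str]]
--         values
--     remove_same_val : bool
--         Remove segments with same values (default: False)
--         For example, 50:01 100:01 300:00 -> 100:01 300:00
--         For example, 50:01 100:01 100:10 300:00 300:01 -> 100:01 300:00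
--
--     """
--     new_breaks = []
--     new_values = []
--
--     if not remove_repeated_val:
--         for br, vl in zip(breaks, values):
--             # remove duplicated break positions, only preserve the first one
--             d = dict()
--             for b, v in zip(br, vl):
--                 if b not in d:
--                     d[b] = v
--
--             d.pop(0, None)
--             new_breaks.append(list(d.keys()))
--             new_values.append(list(d.values()))
--     else:
--         for br, vl in zip(breaks, values):
--             # remove duplicated break positions, only preserve the first one
--             last_break = None
--             last_value = None
--             d = dict()
--             for b, v in zip(br, vl):
--                 if (last_value is not None) and (v != last_value):
--                     # this value is different from the last one
--                     # record last one as break points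
--                     if last_break not in d:
--                         d[last_break] = last_value
--                 # either: last_value is None
--                 # or: this value is the same as the last one, extend
--                 last_break, last_value = b, v
--
--             # record finel one
--             assert last_break is not None
--             if last_break not in d:
--                 d[last_break] = last_value
--
--             d.pop(0, None)
--             new_breaks.append(list(d.keys()))
--             new_values.append(list(d.values()))
--     return new_breaks, new_values
--
-- def lanc_subset_snp_range(
--     breaks: List[List[int]], values: List[List[str]], start: int, stop: int
-- ):
--     """
--     Subset the .lanc file
--
--     Parameters
--     ----------
--     start : int
--         start of SNP
--     stop : int
--         stop of SNP
--     break_list: List[List[int]]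
--         list of break points
--     value_list: List[List[str]]
--     """
--     # TODO: double check this function whether usage of bisect_left is correct
--     # For each individual, find index of break points that's within [start, stop]
--     start_idx = [bisect_left(indiv_break, start) for indiv_break in breaks]
--     stop_idx = [bisect_left(indiv_break, stop) for indiv_break in breaks]
--     new_breaks = [br[s:e] + [stop] for s, e, br in zip(start_idx, stop_idx, breaks)]
--     # offset with start
--     new_breaks = [[b - start for b in br] for br in new_breaks]
--     # find corresponding value
--     new_values = [val[s:e] + [val[e]] for s, e, val in zip(start_idx, stop_idx, values)]
--
--     # clean up
--     new_breaks, new_values = clean_lanc(new_breaks, new_values)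
--     return new_breaks, new_values
-- ===== SOURCE B (Python) =====
-- from bisect import bisect_left
--
--
-- def lanc_subset_snp_range(breaks, values, start, stop):
--     # Per-individual recursive decomposition built around (break, value) PAIRS:
--     # the first-wins deduplication is done by a recursive keep-head /
--     # filter-its-key-from-the-tail scheme (no dict, no clean_lanc helper), the
--     # zero offset is filtered afterwards, and the two output lists are obtained
--     # by unzipping the kept pairs.
--     def dedup(pairs):
--         if not pairs:
--             return []
--         head, rest = pairs[0], pairs[1:]
--         return [head] + dedup([p for p in rest if p[0] != head[0]])
--
--     def subset(br, vl):
--         s, e = bisect_left(br, start), bisect_left(br, stop)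
--         window = [(b - start, v) for b, v in zip(br[s:e], vl[s:e])]
--         kept = [p for p in dedup(window + [(stop - start, vl[e])]) if p[0] != 0]
--         return [b for b, _ in kept], [v for _, v in kept]
--
--     out = [subset(br, vl) for br, vl in zip(breaks, values)]
--     return [nb for nb, _ in out], [nv for _, nv in out]
-- ===== Notes on version B (the rewrite author's own statement) =====
-- stated objective: alternative
-- what changed: Replaces A's staged whole-list comprehensions plus the dict-based clean_lanc helper by a per-individual pair-centric decomposition: a recursive keep-head/filter-its-key-from-the-tail first-wins dedup over (break,value) pairs, a filter dropping offset 0, and a final unzip; trades dict bookkeeping for quadratic filter recursion per individual.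
import Mathlib
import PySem

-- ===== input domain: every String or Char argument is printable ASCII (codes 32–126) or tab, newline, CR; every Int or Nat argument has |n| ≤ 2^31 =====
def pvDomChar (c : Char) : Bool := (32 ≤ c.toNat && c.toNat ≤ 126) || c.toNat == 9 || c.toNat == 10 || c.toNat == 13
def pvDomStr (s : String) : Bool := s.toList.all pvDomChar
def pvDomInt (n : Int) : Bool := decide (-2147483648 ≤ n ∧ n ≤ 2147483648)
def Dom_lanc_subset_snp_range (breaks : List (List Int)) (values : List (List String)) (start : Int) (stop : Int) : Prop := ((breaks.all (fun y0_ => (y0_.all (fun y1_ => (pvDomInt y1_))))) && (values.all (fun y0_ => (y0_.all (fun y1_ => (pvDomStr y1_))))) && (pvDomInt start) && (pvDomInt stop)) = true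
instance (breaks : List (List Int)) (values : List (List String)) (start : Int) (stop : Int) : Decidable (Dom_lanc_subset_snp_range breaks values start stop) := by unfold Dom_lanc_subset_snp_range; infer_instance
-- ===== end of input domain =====

-- B replaces A's staged comprehensions + dict-based clean_lanc helper by a per-individual
-- pair-centric decomposition whose first-wins dedup is a recursive keep-head/filter-tail
-- scheme, unzipping the kept pairs at the end; objective: alternative.

-- ===== PORT A =====
-- port of clean_lanc with remove_repeated_val = False (the only way A calls it)
def cleanLanc (breaks : List (List Int)) (values : List (List String)) :
    List (List Int) × List (List String) :=
  (breaks.zip values).foldl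
    (fun acc p =>
      let d := (p.1.zip p.2).foldl
        (fun d q => if d.contains q.1 = true then d else d.insert q.1 q.2)
        (PySem.Dict.empty : PySem.Dict Int String)
      let d := d.erase 0
      (acc.1 ++ [d.keys], acc.2 ++ [d.values]))
    ([], [])

def lanc_subset_snp_range (breaks : List (List Int)) (values : List (List String)) (start : Int) (stop : Int) : List (List Int) × List (List String) :=
  let start_idx := breaks.map (fun indiv_break => PySem.List.bisectLeft indiv_break start)
  let stop_idx := breaks.map (fun indiv_break => PySem.List.bisectLeft indiv_break stop)
  let new_breaks := (start_idx.zip (stop_idx.zip breaks)).map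
    (fun t => PySem.List.slice t.2.2 (some (t.1 : Int)) (some (t.2.1 : Int)) ++ [stop])
  let new_breaks2 := new_breaks.map (fun br => br.map (fun b => b - start))
  -- val[e]: pyGet? is none exactly where Python raises IndexError; those inputs are outside Pre_
  let new_values := (start_idx.zip (stop_idx.zip values)).map
    (fun t => PySem.List.slice t.2.2 (some (t.1 : Int)) (some (t.2.1 : Int)) ++
              [(PySem.List.pyGet? t.2.2 (t.2.1 : Int)).getD ""])
  cleanLanc new_breaks2 new_values

-- ===== PORT B =====
-- Source B's recursive first-wins dedup: keep the head pair, drop its key from the tail, recurse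
def pvDedup : List (Int × String) → List (Int × String)
  | [] => []
  | q :: rest => q :: pvDedup (rest.filter (fun p => p.1 ≠ q.1))
  termination_by l => l.length
  decreasing_by
    simp only [List.length_unattach]
    exact Nat.lt_succ_of_le (Nat.le_trans (List.length_filter_le _ _) (by simp))

-- Source B's per-individual `subset` helper (start/stop are the captured closure arguments)
def pvSubsetB (start stop : Int) (br : List Int) (vl : List String) : List Int × List String :=
  let s := PySem.List.bisectLeft br start
  let e := PySem.List.bisectLeft br stop
  let window := ((PySem.List.slice br (some (s : Int)) (some (e : Int))).zip
                  (PySem.List.slice vl (some (s : Int)) (some (e : Int)))).map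
                (fun q => (q.1 - start, q.2))
  -- vl[e]: pyGet? is none exactly where Python raises IndexError; those inputs are outside Pre_
  let kept := (pvDedup (window ++ [(stop - start, (PySem.List.pyGet? vl (e : Int)).getD "")])).filter
                (fun p => p.1 ≠ 0)
  (kept.map Prod.fst, kept.map Prod.snd)

def lanc_subset_snp_range_alt (breaks : List (List Int)) (values : List (List String)) (start : Int) (stop : Int) : List (List Int) × List (List String) :=
  let out := (breaks.zip values).map (fun p => pvSubsetB start stop p.1 p.2)
  (out.map Prod.fst, out.map Prod.snd)

-- ===== PRECONDITION & SPEC =====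
-- Pre_ excludes exactly the inputs where A raises IndexError at `val[e]` (the stop-side bisect
-- index past the end of an individual's value list); B raises there too.
def Pre_lanc_subset_snp_range (breaks : List (List Int)) (values : List (List String)) (start : Int) (stop : Int) : Prop :=
  ∀ p ∈ breaks.zip values, PySem.List.bisectLeft p.1 stop < p.2.length
instance (breaks : List (List Int)) (values : List (List String)) (start : Int) (stop : Int) : Decidable (Pre_lanc_subset_snp_range breaks values start stop) := by unfold Pre_lanc_subset_snp_range; infer_instance

def pvWitness_lanc_subset_snp_range : List (List Int) × List (List String) × Int × Int :=
  ([[2, 5, 7]], [["a", "b", "c", "d"]], 1, 6)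

def Spec_lanc_subset_snp_range (breaks : List (List Int)) (values : List (List String)) (start : Int) (stop : Int) (out : List (List Int) × List (List String)) : Prop := out = lanc_subset_snp_range_alt breaks values start stop
instance (breaks : List (List Int)) (values : List (List String)) (start : Int) (stop : Int) (out : List (List Int) × List (List String)) : Decidable (Spec_lanc_subset_snp_range breaks values start stop out) := by unfold Spec_lanc_subset_snp_range; infer_instance

-- ===== CLAIM (what is proved, stated in full; the proofs are below) =====
def Claim_equal_lanc_subset_snp_range : Prop := ∀ (breaks : List (List Int)) (values : List (List String)) (start : Int) (stop : Int), Dom_lanc_subset_snp_range breaks values start stop → Pre_lanc_subset_snp_range breaks values start stop → Spec_lanc_subset_snp_range breaks values start stop (lanc_subset_snp_range breaks values start stop)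

-- ===== LEMMAS AND PROOFS =====

-- bisect_left never lands beyond `hi` (no sortedness assumption)
lemma pv_blLoop_le (xs : List Int) (x : Int) :
    ∀ (fuel lo hi : Nat), lo ≤ hi → PySem.List.bisectLeftLoop xs x fuel lo hi ≤ hi := by
  intro fuel
  induction fuel with
  | zero => intro lo hi h; rw [PySem.List.bisectLeftLoop]; exact h
  | succ n ih =>
    intro lo hi h
    rw [PySem.List.bisectLeftLoop]
    split
    · rename_i hlt
      cases hget : xs[(lo + hi) / 2]? with
      | none => simp [h]
      | some y =>
        by_cases hyx : y < x
        · simpa [hyx] using ih ((lo + hi) / 2 + 1) hi (by omega)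
        · simpa [hyx] using le_trans (ih lo ((lo + hi) / 2) (by omega)) (by omega)
    · exact h

lemma pv_bl_le (xs : List Int) (x : Int) : PySem.List.bisectLeft xs x ≤ xs.length := by
  simpa [PySem.List.bisectLeft] using pv_blLoop_le xs x xs.length 0 xs.length (Nat.zero_le _)

-- A's per-pair dict step, as a named function
def pvAStep (d : PySem.Dict Int String) (q : Int × String) : PySem.Dict Int String :=
  if d.contains q.1 = true then d else d.insert q.1 q.2

-- core: the items of A's first-wins dict fold ARE B's recursive dedup (of the not-yet-seen pairs)
lemma pv_items_fold (ps : List (Int × String)) :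
    ∀ d : PySem.Dict Int String,
    (ps.foldl pvAStep d).items = d.items ++ pvDedup (ps.filter (fun q => !d.contains q.1)) := by
  induction ps with
  | nil => intro d; simp [pvDedup]
  | cons q rest ih =>
    intro d
    obtain ⟨b, v⟩ := q
    simp only [List.foldl_cons, List.filter_cons]
    by_cases hc : d.contains b = true
    · have hstep : pvAStep d (b, v) = d := by simp [pvAStep, hc]
      rw [hstep, ih d]
      simp [hc]
    · have hc' : d.contains b = false := by simpa using hc
      have hstep : pvAStep d (b, v) = d.insert b v := by simp [pvAStep, hc']
      rw [hstep, ih (d.insert b v),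
        PySem.Dict.items_insert_of_not_contains _ _ hc']
      have hfil : rest.filter (fun q => !(d.insert b v).contains q.1)
          = (rest.filter (fun q => !d.contains q.1)).filter (fun p => p.1 ≠ b) := by
        rw [List.filter_filter]
        refine List.filter_congr fun p _ => ?_
        rw [PySem.Dict.contains_insert]
        by_cases hpb : p.1 = b <;> simp [hpb, hc']
      rw [hfil]
      have : pvDedup ((b, v) :: rest.filter (fun q => !d.contains q.1))
          = (b, v) :: pvDedup ((rest.filter (fun q => !d.contains q.1)).filter (fun p => p.1 ≠ b)) := by
        rw [pvDedup]
      simp [hc', this]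

-- per-individual: A's keys/values of (fold, erase 0) = B's filtered dedup, unzipped
lemma pv_KV (ps : List (Int × String)) :
    ((((ps.foldl pvAStep PySem.Dict.empty).erase 0).keys),
     (((ps.foldl pvAStep PySem.Dict.empty).erase 0).values))
      = (((pvDedup ps).filter (fun p => p.1 ≠ 0)).map Prod.fst,
         ((pvDedup ps).filter (fun p => p.1 ≠ 0)).map Prod.snd) := by
  have h := pv_items_fold ps PySem.Dict.empty
  have hps : ps.filter (fun q => !(PySem.Dict.empty : PySem.Dict Int String).contains q.1) = ps := by
    simp [PySem.Dict.contains, PySem.Dict.empty]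
  rw [hps] at h
  have hitems : ((ps.foldl pvAStep PySem.Dict.empty).erase 0).items
      = (pvDedup ps).filter (fun p => p.1 ≠ 0) := by
    simp only [PySem.Dict.erase, h]
    simp [PySem.Dict.empty]
    exact List.filter_congr fun p _ => by by_cases hp : p.1 = 0 <;> simp [hp]
  refine Prod.ext ?_ ?_ <;> simp [PySem.Dict.keys, PySem.Dict.values, hitems]

-- per-individual sliced/appended lists from A's pipeline, and the shared offset pair list
def pvNB (start stop : Int) (br : List Int) : List Int :=
  (PySem.List.slice br (some (PySem.List.bisectLeft br start : Int))
      (some (PySem.List.bisectLeft br stop : Int)) ++ [stop]).map (fun b => b - start)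

def pvNV (start stop : Int) (br : List Int) (vl : List String) : List String :=
  PySem.List.slice vl (some (PySem.List.bisectLeft br start : Int))
      (some (PySem.List.bisectLeft br stop : Int)) ++
    [(PySem.List.pyGet? vl (PySem.List.bisectLeft br stop : Int)).getD ""]

def pvPairs (start stop : Int) (br : List Int) (vl : List String) : List (Int × String) :=
  ((PySem.List.slice br (some (PySem.List.bisectLeft br start : Int))
       (some (PySem.List.bisectLeft br stop : Int))).zip
     (PySem.List.slice vl (some (PySem.List.bisectLeft br start : Int))
       (some (PySem.List.bisectLeft br stop : Int)))).map (fun q => (q.1 - start, q.2)) ++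
    [(stop - start, (PySem.List.pyGet? vl (PySem.List.bisectLeft br stop : Int)).getD "")]

lemma pv_zip_one (start stop : Int) (br : List Int) (vl : List String)
    (hev : PySem.List.bisectLeft br stop < vl.length) :
    (pvNB start stop br).zip (pvNV start stop br vl) = pvPairs start stop br vl := by
  have hs := pv_bl_le br start
  have he := pv_bl_le br stop
  set s := PySem.List.bisectLeft br start with hsdef
  set e := PySem.List.bisectLeft br stop with hedef
  have hlen : ((PySem.List.slice br (some (s : Int)) (some (e : Int))).map (fun b => b - start)).length
      = (PySem.List.slice vl (some (s : Int)) (some (e : Int))).length := by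
    simp only [List.length_map, PySem.List.length_slice, PySem.List.clampIdx_natCast]
    omega
  unfold pvNB pvNV pvPairs
  rw [List.map_append, List.zip_append hlen, List.zip_map_left, ← hsdef, ← hedef]
  refine congrArg₂ (· ++ ·) (List.map_congr_left fun q _ => ?_) rfl
  obtain ⟨a, c⟩ := q
  rfl

-- B's subset helper, on the shared pair list
lemma pv_subsetB_eq (start stop : Int) (br : List Int) (vl : List String) :
    pvSubsetB start stop br vl
      = (((pvDedup (pvPairs start stop br vl)).filter (fun p => p.1 ≠ 0)).map Prod.fst,
         ((pvDedup (pvPairs start stop br vl)).filter (fun p => p.1 ≠ 0)).map Prod.snd) := rfl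

-- A's two per-individual results
def pvK (ps : List (Int × String)) : List Int :=
  ((ps.foldl pvAStep PySem.Dict.empty).erase 0).keys
def pvV (ps : List (Int × String)) : List String :=
  ((ps.foldl pvAStep PySem.Dict.empty).erase 0).values

lemma pv_one (start stop : Int) (br : List Int) (vl : List String)
    (hev : PySem.List.bisectLeft br stop < vl.length) :
    (pvK ((pvNB start stop br).zip (pvNV start stop br vl)),
     pvV ((pvNB start stop br).zip (pvNV start stop br vl)))
      = pvSubsetB start stop br vl := by
  rw [pv_zip_one start stop br vl hev, pv_subsetB_eq]
  exact pv_KV (pvPairs start stop br vl)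

-- A's outer loop: a fold appending one element per individual IS a pair of maps
lemma pv_fold_shape {α β γ : Type} (F : α → List β) (G : α → List γ) (l : List α) :
    l.foldl (fun acc p => (acc.1 ++ [F p], acc.2 ++ [G p])) ([], []) = (l.map F, l.map G) := by
  rw [PySem.List.foldl_prod_mk (fun s p => s ++ [F p]) (fun s p => s ++ [G p]),
    PySem.List.foldl_append_singleton_eq_map, PySem.List.foldl_append_singleton_eq_map,
    List.nil_append, List.nil_append]

-- A's three list-comprehension stages, as one definition (definitionally A's pipeline)
def pvNBs (start stop : Int) (breaks : List (List Int)) : List (List Int) :=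
  (((breaks.map (fun br => PySem.List.bisectLeft br start)).zip
      ((breaks.map (fun br => PySem.List.bisectLeft br stop)).zip breaks)).map
    (fun t => PySem.List.slice t.2.2 (some (t.1 : Int)) (some (t.2.1 : Int)) ++ [stop])).map
    (fun br => br.map (fun b => b - start))

def pvNVs (start stop : Int) (breaks : List (List Int)) (values : List (List String)) : List (List String) :=
  ((breaks.map (fun br => PySem.List.bisectLeft br start)).zip
      ((breaks.map (fun br => PySem.List.bisectLeft br stop)).zip values)).map
    (fun t => PySem.List.slice t.2.2 (some (t.1 : Int)) (some (t.2.1 : Int)) ++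
              [(PySem.List.pyGet? t.2.2 (t.2.1 : Int)).getD ""])

lemma pv_pipeline_zip (start stop : Int) :
    ∀ (breaks : List (List Int)) (values : List (List String)),
    (pvNBs start stop breaks).zip (pvNVs start stop breaks values)
      = (breaks.zip values).map (fun p => (pvNB start stop p.1, pvNV start stop p.1 p.2)) := by
  intro breaks
  induction breaks with
  | nil => intro values; simp [pvNBs, pvNVs]
  | cons br bs ih =>
    intro values
    cases values with
    | nil => simp [pvNBs, pvNVs]
    | cons vl vs =>
      have := ih vs
      simp only [pvNBs, pvNVs, List.map_cons, List.zip_cons_cons] at this ⊢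
      rw [this]
      rfl

-- A as a map over zipped individuals
lemma pv_A_eq (breaks : List (List Int)) (values : List (List String)) (start stop : Int) :
    lanc_subset_snp_range breaks values start stop
      = ((breaks.zip values).map (fun p => pvK ((pvNB start stop p.1).zip (pvNV start stop p.1 p.2))),
         (breaks.zip values).map (fun p => pvV ((pvNB start stop p.1).zip (pvNV start stop p.1 p.2)))) := by
  have h0 : lanc_subset_snp_range breaks values start stop
      = cleanLanc (pvNBs start stop breaks) (pvNVs start stop breaks values) := rfl
  rw [h0]
  show ((pvNBs start stop breaks).zip (pvNVs start stop breaks values)).foldl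
      (fun acc p => (acc.1 ++ [pvK (p.1.zip p.2)], acc.2 ++ [pvV (p.1.zip p.2)])) ([], []) = _
  rw [pv_fold_shape, pv_pipeline_zip, List.map_map, List.map_map]
  rfl

-- B as a map over zipped individuals
lemma pv_B_eq (breaks : List (List Int)) (values : List (List String)) (start stop : Int) :
    lanc_subset_snp_range_alt breaks values start stop
      = ((breaks.zip values).map (fun p => (pvSubsetB start stop p.1 p.2).1),
         (breaks.zip values).map (fun p => (pvSubsetB start stop p.1 p.2).2)) := by
  show (((breaks.zip values).map (fun p => pvSubsetB start stop p.1 p.2)).map Prod.fst,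
        ((breaks.zip values).map (fun p => pvSubsetB start stop p.1 p.2)).map Prod.snd) = _
  rw [List.map_map, List.map_map]
  rfl

-- ===== VERDICT (by name: the statement is the Claim_ definition above) =====
theorem lanc_subset_snp_range_spec : Claim_equal_lanc_subset_snp_range := by
  intro breaks values start stop _hdom hpre
  unfold Spec_lanc_subset_snp_range
  rw [pv_A_eq, pv_B_eq]
  refine Prod.ext ?_ ?_ <;> simp only [] <;>
    refine List.map_congr_left (fun p hp => ?_)
  · exact congrArg Prod.fst (pv_one start stop p.1 p.2 (hpre p hp))
  · exact congrArg Prod.snd (pv_one start stop p.1 p.2 (hpre p hp))
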